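-- pv_equiv track=rewrite | github.com/takuto-oono/AtCoder2 | C-Matrix_Reducing.py | is_same_a_and_b
-- ===== SOURCE A (Python) =====
-- import itertools
-- from typing import List, Tuple, Generator
--
-- def create_new_a_list(a_list: List[List[int]], row_combination: List[int], column_combination: List[int]) -> Generator[
--     List[int], int, int]:
--     for row in row_combination:
--         new_list = []
--         for column in column_combination:
--             new_list.append(a_list[row][column])
--         yield new_list
--
-- def is_same_a_and_b(a_list: List[List[int]], b_list: List[List[int]], a_row: int, a_column: int, b_row: int,
--                     b_column) -> bool:
--     row_combinations = list(itertools.combinations([i for i in range(a_row)], b_row))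
--     column_combinations = list(itertools.combinations([i for i in range(a_column)], b_column))
--
--     for row_combination in row_combinations:
--         for column_combination in column_combinations:
--             new_a_list = [new_row for new_row in create_new_a_list(a_list, row_combination, column_combination)]
--             if new_a_list == b_list:
--                 return True
--     return False
-- ===== SOURCE B (Python) =====
-- import itertools
--
--
-- def is_same_a_and_b(a_list, b_list, a_row, a_column, b_row, b_column):
--     # B must be exactly b_row selected rows; a shorter/longer b_list never matches.
--     if len(b_list) != b_row:
--         return False
--     rows = a_list[:a_row] if a_row > 0 else []
--     if len(rows) < b_row:
--         return False
--     for cols in itertools.combinations(range(a_column), b_column):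
--         k = 0
--         for row in rows:
--             if k < len(b_list) and [row[c] for c in cols] == b_list[k]:
--                 k += 1
--         if k == len(b_list):
--             return True
--     return False
-- ===== Notes on version B (the rewrite author's own statement) =====
-- stated objective: alternative
-- what changed: Drops the enumeration of row combinations entirely: for each column combination B reduces the (sliced) rows and decides with a single greedy left-to-right subsequence scan whether b_list occurs as b_row selected rows, after guarding len(b_list) == b_row and a quick too-few-rows reject.
-- outside the precondition, e.g. on is_same_a_and_b([], [[], []], 2, 0, 2, 0): A returns True, B returns False; on is_same_a_and_b([[1], [2]], [[1], [2]], 2, 2, 2, 1): A returns True, B returns True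
import Mathlib
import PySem

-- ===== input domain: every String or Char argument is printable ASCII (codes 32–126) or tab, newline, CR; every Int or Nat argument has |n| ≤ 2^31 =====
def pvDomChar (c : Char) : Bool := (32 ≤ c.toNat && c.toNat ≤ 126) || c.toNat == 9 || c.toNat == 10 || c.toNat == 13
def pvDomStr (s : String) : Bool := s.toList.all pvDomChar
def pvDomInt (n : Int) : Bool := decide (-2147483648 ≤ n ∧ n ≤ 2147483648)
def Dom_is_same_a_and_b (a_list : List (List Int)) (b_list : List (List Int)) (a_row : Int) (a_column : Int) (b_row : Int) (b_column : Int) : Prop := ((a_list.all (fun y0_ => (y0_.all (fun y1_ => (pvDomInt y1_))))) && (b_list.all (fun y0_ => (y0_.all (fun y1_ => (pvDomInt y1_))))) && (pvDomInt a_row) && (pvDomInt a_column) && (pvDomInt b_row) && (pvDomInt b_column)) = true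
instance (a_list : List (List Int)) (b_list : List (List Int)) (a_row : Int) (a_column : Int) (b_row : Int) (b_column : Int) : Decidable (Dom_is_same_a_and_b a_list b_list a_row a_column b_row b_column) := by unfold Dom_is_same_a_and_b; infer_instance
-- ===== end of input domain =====

-- B drops A's enumeration of row combinations: per column combination it decides membership
-- of b_list among the reduced rows by one greedy subsequence scan (objective: alternative).


-- itertools.combinations over a list, r at a time, in itertools' lexicographic order
-- (shared helper: both Pythons call itertools.combinations)
def pyCombos {α : Type} (l : List α) (r : Nat) : List (List α) :=
  -- itertools.combinations first checks `if r > n: return` (empty result, no enumeration)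
  if l.length < r then []
  else
    match l, r with
    | _, 0 => [[]]
    | [], _ + 1 => []
    | x :: xs, r + 1 => (pyCombos xs r).map (x :: ·) ++ pyCombos xs (r + 1)

-- ===== PORT A =====
-- create_new_a_list materialised: the generator yields, per row, the list of selected columns
def createNewAList (a_list : List (List Int)) (row_combination : List Int) (column_combination : List Int) : List (List Int) :=
  row_combination.map (fun row =>
    column_combination.map (fun column => (PySem.List.pyGet? ((PySem.List.pyGet? a_list row).getD []) column).getD 0))

def is_same_a_and_b (a_list : List (List Int)) (b_list : List (List Int)) (a_row : Int) (a_column : Int) (b_row : Int) (b_column : Int) : Bool :=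
  let row_combinations := pyCombos (PySem.List.pyRange 0 a_row 1) b_row.toNat
  let column_combinations := pyCombos (PySem.List.pyRange 0 a_column 1) b_column.toNat
  -- the nested for-loops with early `return True`:
  row_combinations.any (fun row_combination =>
    column_combinations.any (fun column_combination =>
      createNewAList a_list row_combination column_combination == b_list))

-- ===== PORT B =====
-- rows = a_list[:a_row] if a_row > 0 else []
def bRows (a_list : List (List Int)) (a_row : Int) : List (List Int) :=
  if 0 < a_row then PySem.List.slice a_list none (some a_row) else []

-- greedy pointer into b_list, advanced once per matching reduced row
def greedyScan (rows : List (List Int)) (b_list : List (List Int)) (cols : List Int) : Nat :=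
  rows.foldl (fun k row =>
    if k < b_list.length && (cols.map (fun c => (PySem.List.pyGet? row c).getD 0) == (b_list[k]?).getD []) then
      k + 1
    else k) 0

def is_same_a_and_b_alt (a_list : List (List Int)) (b_list : List (List Int)) (a_row : Int) (a_column : Int) (b_row : Int) (b_column : Int) : Bool :=
  if (b_list.length : Int) ≠ b_row then false
  else if ((bRows a_list a_row).length : Int) < b_row then false
  else
    (pyCombos (PySem.List.pyRange 0 a_column 1) b_column.toNat).any
      (fun cols => greedyScan (bRows a_list a_row) b_list cols == b_list.length)

-- ===== PRECONDITION & SPEC =====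
-- Pre_ excludes negative selection counts (A raises ValueError there) and shape-inconsistent
-- calls (a_row/a_column exceeding a_list's real dimensions) except when an empty combination
-- list makes A trivially return False without reading a_list; on the excluded shape-inconsistent
-- inputs A usually raises IndexError, but can return a value accidentally (with b_column == 0 it
-- never reads a_list, and an early match can precede the out-of-range access).
def Pre_is_same_a_and_b (a_list : List (List Int)) (b_list : List (List Int)) (a_row : Int) (a_column : Int) (b_row : Int) (b_column : Int) : Prop :=
  0 ≤ b_row ∧ 0 ≤ b_column ∧
    (b_row = 0 ∨ (1 ≤ b_row ∧ a_row < b_row) ∨ (1 ≤ b_column ∧ a_column < b_column) ∨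
      (a_row ≤ (a_list.length : Int) ∧ ∀ r ∈ a_list, a_column ≤ (r.length : Int)))
instance (a_list : List (List Int)) (b_list : List (List Int)) (a_row : Int) (a_column : Int) (b_row : Int) (b_column : Int) : Decidable (Pre_is_same_a_and_b a_list b_list a_row a_column b_row b_column) := by unfold Pre_is_same_a_and_b; infer_instance

def pvWitness_is_same_a_and_b : List (List Int) × List (List Int) × Int × Int × Int × Int :=
  ([[1, 2, 3], [4, 5, 6], [7, 8, 9]], [[1, 3], [7, 9]], 3, 3, 2, 2)

def Spec_is_same_a_and_b (a_list : List (List Int)) (b_list : List (List Int)) (a_row : Int) (a_column : Int) (b_row : Int) (b_column : Int) (out : Bool) : Prop := out = is_same_a_and_b_alt a_list b_list a_row a_column b_row b_column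
instance (a_list : List (List Int)) (b_list : List (List Int)) (a_row : Int) (a_column : Int) (b_row : Int) (b_column : Int) (out : Bool) : Decidable (Spec_is_same_a_and_b a_list b_list a_row a_column b_row b_column out) := by unfold Spec_is_same_a_and_b; infer_instance

-- ===== CLAIM (what is proved, stated in full; the proofs are below) =====
def Claim_equal_is_same_a_and_b : Prop := ∀ (a_list : List (List Int)) (b_list : List (List Int)) (a_row : Int) (a_column : Int) (b_row : Int) (b_column : Int), Dom_is_same_a_and_b a_list b_list a_row a_column b_row b_column → Pre_is_same_a_and_b a_list b_list a_row a_column b_row b_column → Spec_is_same_a_and_b a_list b_list a_row a_column b_row b_column (is_same_a_and_b a_list b_list a_row a_column b_row b_column)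

-- ===== LEMMAS AND PROOFS =====

theorem pyCombos_eq_nil {α : Type} (l : List α) (r : Nat) (h : l.length < r) :
    pyCombos l r = [] := by
  unfold pyCombos
  rw [if_pos h]

theorem pyCombos_zero {α : Type} (l : List α) : pyCombos l 0 = [[]] := by
  cases l <;> simp [pyCombos]

-- pyCombos enumerates exactly the sublists of the given length (itertools.combinations of a list)
theorem mem_pyCombos {α : Type} (l : List α) (r : Nat) (c : List α) :
    c ∈ pyCombos l r ↔ c.Sublist l ∧ c.length = r := by
  induction l generalizing r c with
  | nil =>
    cases r with
    | zero =>
      simp only [pyCombos_zero, List.mem_singleton, List.sublist_nil, List.length_eq_zero_iff]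
      tauto
    | succ r =>
      rw [pyCombos_eq_nil _ _ (by simp)]
      simp only [List.not_mem_nil, false_iff, not_and]
      intro h
      simp [List.sublist_nil.mp h]
  | cons x xs ih =>
    cases r with
    | zero =>
      simp only [pyCombos_zero, List.mem_singleton, List.length_eq_zero_iff]
      constructor
      · rintro rfl; exact ⟨List.nil_sublist _, rfl⟩
      · rintro ⟨-, rfl⟩; rfl
    | succ r =>
      by_cases hg : (x :: xs).length < r + 1
      · rw [pyCombos_eq_nil _ _ hg]
        simp only [List.not_mem_nil, false_iff, not_and]
        intro hs hl
        have := hs.length_le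
        omega
      · rw [pyCombos]
        rw [if_neg hg]
        simp only [List.mem_append, List.mem_map, ih]
        constructor
        · rintro (⟨t, ⟨hs, hl⟩, rfl⟩ | ⟨hs, hl⟩)
          · exact ⟨List.cons_sublist_cons.mpr hs, by simp [hl]⟩
          · exact ⟨hs.cons x, hl⟩
        · rintro ⟨hs, hl⟩
          rcases List.sublist_cons_iff.mp hs with h | ⟨t, rfl, ht⟩
          · exact Or.inr ⟨h, hl⟩
          · exact Or.inl ⟨t, ⟨ht, by simpa using hl⟩, rfl⟩

-- greedy scan with value map f reaches the end of b iff the rest of b is a sublist of l.map f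
theorem greedy_fold_iff {α : Type} (f : α → List Int) (b : List (List Int)) (l : List α) (k : Nat)
    (hk : k ≤ b.length) :
    l.foldl (fun k x => if k < b.length && (f x == (b[k]?).getD []) then k + 1 else k) k
      = b.length ↔ (b.drop k).Sublist (l.map f) := by
  induction l generalizing k with
  | nil =>
    simp only [List.foldl_nil, List.map_nil, List.sublist_nil, List.drop_eq_nil_iff]
    omega
  | cons i is ih =>
    simp only [List.foldl_cons, List.map_cons]
    by_cases hlt : k < b.length
    · have hdrop : b[k] :: b.drop (k + 1) = b.drop k := List.getElem_cons_drop hlt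
      have hget : (b[k]?).getD [] = b[k] := by simp [List.getElem?_eq_getElem hlt]
      by_cases heq : f i = b[k]
      · have hc : (k < b.length && (f i == (b[k]?).getD [])) = true := by
          simp [hlt, heq]
        rw [hc]
        simp only [if_true]
        rw [ih (k + 1) (by omega)]
        rw [← hdrop, ← heq, List.cons_sublist_cons]
      · have hc : (k < b.length && (f i == (b[k]?).getD [])) = false := by
          simp [hget, heq]
        rw [hc]
        simp only [Bool.false_eq_true, if_false]
        rw [ih k hk]
        constructor
        · intro h; exact h.cons _
        · intro h
          rcases List.sublist_cons_iff.mp h with h' | ⟨t, hbt, ht⟩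
          · exact h'
          · exfalso
            apply heq
            have h2 : b[k] :: b.drop (k + 1) = f i :: t := hdrop.trans hbt
            injection h2 with h3 _
            exact h3.symm
    · have hk' : k = b.length := by omega
      have hc : (k < b.length && (f i == (b[k]?).getD [])) = false := by simp [hlt]
      rw [hc]
      simp only [Bool.false_eq_true, if_false]
      rw [ih k hk]
      subst hk'
      simp

theorem greedyScan_nil_b (rows : List (List Int)) (cols : List Int) :
    greedyScan rows [] cols = 0 := by
  have h := (greedy_fold_iff (fun row => cols.map (fun c => (PySem.List.pyGet? row c).getD 0))
      ([] : List (List Int)) rows 0 (Nat.le_refl _)).mpr (by simp)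
  unfold greedyScan
  exact h

theorem bRows_length_le (a_list : List (List Int)) (a_row : Int) :
    (bRows a_list a_row).length ≤ a_row.toNat := by
  unfold bRows
  split
  · rename_i h
    rw [PySem.List.slice_to _ (by omega)]
    simp [List.length_take]
  · simp

-- in the shape-consistent case the sliced rows, reduced, are exactly A's indexed reduced rows
theorem bRows_map_eq (a_list : List (List Int)) (a_row : Int) (h : List Int → List Int)
    (ha0 : 0 < a_row) (hal : a_row ≤ (a_list.length : Int)) :
    (bRows a_list a_row).map h
      = (PySem.List.pyRange 0 a_row 1).map (fun i => h ((PySem.List.pyGet? a_list i).getD [])) := by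
  unfold bRows
  rw [if_pos ha0, PySem.List.slice_to _ (by omega), PySem.List.pyRange_one]
  rw [List.map_map]
  apply List.ext_getElem
  · simp
    omega
  · intro i h1 h2
    simp only [List.getElem_map, List.getElem_take, List.getElem_range, Function.comp_apply]
    have hi : i < a_list.length := by
      simp [List.length_take] at h1
      omega
    rw [zero_add, PySem.List.pyGet?_natCast, List.getElem?_eq_getElem hi]
    rfl

-- ===== VERDICT (by name: the statement is the Claim_ definition above) =====
theorem is_same_a_and_b_spec : Claim_equal_is_same_a_and_b := by
  intro a_list b_list a_row a_column b_row b_column hdom hpre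
  obtain ⟨hbr, hbc, hdisj⟩ := hpre
  unfold Spec_is_same_a_and_b
  simp only [is_same_a_and_b, is_same_a_and_b_alt]
  by_cases hlen : (b_list.length : Int) = b_row
  case neg =>
    -- b_list has the wrong number of rows: A never matches, B rejects up front
    rw [if_pos hlen]
    simp only [List.any_eq_false]
    intro rc hrc hany
    simp only [List.any_eq_true, beq_iff_eq] at hany
    obtain ⟨cc, hcc, heq⟩ := hany
    have h1 : (createNewAList a_list rc cc).length = rc.length := by simp [createNewAList]
    have h2 := ((mem_pyCombos _ _ _).mp hrc).2
    rw [heq] at h1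
    omega
  case pos =>
    rw [if_neg (not_not.mpr hlen)]
    have hnb : b_list.length = b_row.toNat := by omega
    rcases hdisj with h0 | h2 | h3 | hsafe
    · -- b_row = 0: both sides are True exactly when a column combination exists
      subst h0
      have hb : b_list = [] := by
        apply List.eq_nil_of_length_eq_zero
        omega
      subst hb
      rw [if_neg (by simp)]
      simp only [Int.toNat_zero, pyCombos_zero]
      rw [Bool.eq_iff_iff]
      simp only [List.any_eq_true, List.mem_singleton, exists_eq_left]
      constructor
      · rintro ⟨cc, hcc, -⟩
        exact ⟨cc, hcc, by simp [greedyScan_nil_b]⟩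
      · rintro ⟨cc, hcc, -⟩
        exact ⟨cc, hcc, by simp [createNewAList]⟩
    · -- 1 ≤ b_row and a_row < b_row: no row combination and too few rows — both False
      have hR : pyCombos (PySem.List.pyRange 0 a_row 1) b_row.toNat = [] := by
        apply pyCombos_eq_nil
        rw [PySem.List.length_pyRange_one]
        omega
      have hguard : ((bRows a_list a_row).length : Int) < b_row := by
        have := bRows_length_le a_list a_row
        omega
      rw [hR, if_pos hguard]
      simp
    · -- 1 ≤ b_column and a_column < b_column: no column combination — both False
      have hC : pyCombos (PySem.List.pyRange 0 a_column 1) b_column.toNat = [] := by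
        apply pyCombos_eq_nil
        rw [PySem.List.length_pyRange_one]
        omega
      rw [hC]
      simp
    · -- shape-consistent case
      obtain ⟨hal, hcol⟩ := hsafe
      by_cases har : 0 < a_row
      · have hrl : (bRows a_list a_row).length = a_row.toNat := by
          unfold bRows
          rw [if_pos har, PySem.List.slice_to _ (by omega)]
          simp
          omega
        by_cases hguard : ((bRows a_list a_row).length : Int) < b_row
        · -- fewer rows than b_row: no row combination either — both False
          have hR : pyCombos (PySem.List.pyRange 0 a_row 1) b_row.toNat = [] := by
            apply pyCombos_eq_nil
            rw [PySem.List.length_pyRange_one]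
            omega
          rw [hR, if_pos hguard]
          simp
        · rw [if_neg hguard]
          rw [Bool.eq_iff_iff]
          simp only [List.any_eq_true, beq_iff_eq]
          constructor
          · rintro ⟨rc, hrc, cc, hcc, heq⟩
            refine ⟨cc, hcc, ?_⟩
            have hsub : b_list.Sublist ((bRows a_list a_row).map
                (fun row => cc.map (fun c => (PySem.List.pyGet? row c).getD 0))) := by
              rw [bRows_map_eq a_list a_row _ har hal]
              obtain ⟨hrs, -⟩ := (mem_pyCombos _ _ _).mp hrc
              rw [← heq]
              exact hrs.map _
            have h := (greedy_fold_iff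
                (fun row => cc.map (fun c => (PySem.List.pyGet? row c).getD 0))
                b_list (bRows a_list a_row) 0 (Nat.zero_le _)).mpr (by simpa using hsub)
            simpa [greedyScan] using h
          · rintro ⟨cc, hcc, hg⟩
            have hsub := (greedy_fold_iff
                (fun row => cc.map (fun c => (PySem.List.pyGet? row c).getD 0))
                b_list (bRows a_list a_row) 0 (Nat.zero_le _)).mp (by simpa [greedyScan] using hg)
            simp only [List.drop_zero] at hsub
            rw [bRows_map_eq a_list a_row _ har hal] at hsub
            obtain ⟨rc, hrs, hmap⟩ := List.sublist_map_iff.mp hsub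
            have hlenrc : rc.length = b_row.toNat := by
              have := congrArg List.length hmap
              simp only [List.length_map] at this
              omega
            exact ⟨rc, (mem_pyCombos _ _ _).mpr ⟨hrs, hlenrc⟩, cc, hcc, hmap.symm⟩
      · -- a_row ≤ 0: no rows at all
        have hrows : bRows a_list a_row = [] := by unfold bRows; rw [if_neg har]
        by_cases hb0 : b_row = 0
        · subst hb0
          have hb : b_list = [] := by
            apply List.eq_nil_of_length_eq_zero
            omega
          subst hb
          rw [if_neg (by simp)]
          simp only [Int.toNat_zero, pyCombos_zero]
          rw [Bool.eq_iff_iff]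
          simp only [List.any_eq_true, List.mem_singleton, exists_eq_left]
          constructor
          · rintro ⟨cc, hcc, -⟩
            exact ⟨cc, hcc, by simp [greedyScan_nil_b]⟩
          · rintro ⟨cc, hcc, -⟩
            exact ⟨cc, hcc, by simp [createNewAList]⟩
        · have hR : pyCombos (PySem.List.pyRange 0 a_row 1) b_row.toNat = [] := by
            apply pyCombos_eq_nil
            rw [PySem.List.length_pyRange_one]
            omega
          have hguard : ((bRows a_list a_row).length : Int) < b_row := by
            rw [hrows]
            simp
            omega
          rw [hR, if_pos hguard]
          simp
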